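-- pv_equiv track=rewrite | github.com/yuro-s/cs313e | recursion2.py | groupNoAdj
-- ===== SOURCE A (Python) =====
-- def groupNoAdj(start, nums, target):
--     # base case is if target is reached or array end is reached
--     if target == 0:
--         return True
--     if start >= len(nums):
--         return False
--     # take current value and increment index by 2 to skip next value
--     if(groupNoAdj(start+2, nums, target-nums[start])):
--         return True
--     else:
--         # don't take the current value and increment index by 1
--         return groupNoAdj(start+1, nums, target)
-- ===== SOURCE B (Python) =====
-- def groupNoAdj(start, nums, target):
--     # Memoized top-down search on the state (index, remaining target):
--     # each state is solved at most once instead of re-explored exponentially.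
--     memo = {}
--
--     def go(i, t):
--         if t == 0:
--             return True
--         if i >= len(nums):
--             return False
--         key = (i, t)
--         if key in memo:
--             return memo[key]
--         r = go(i + 2, t - nums[i]) or go(i + 1, t)
--         memo[key] = r
--         return r
--
--     return go(start, target)
-- ===== Notes on version B (the rewrite author's own statement) =====
-- stated objective: alternative
-- what changed: Replaces A's plain exponential backtracking with the same search memoized in a dict keyed by (index, remaining target), so each state is solved at most once per query; worst-case cost is similar when all remaining targets are distinct.
import Mathlib
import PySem

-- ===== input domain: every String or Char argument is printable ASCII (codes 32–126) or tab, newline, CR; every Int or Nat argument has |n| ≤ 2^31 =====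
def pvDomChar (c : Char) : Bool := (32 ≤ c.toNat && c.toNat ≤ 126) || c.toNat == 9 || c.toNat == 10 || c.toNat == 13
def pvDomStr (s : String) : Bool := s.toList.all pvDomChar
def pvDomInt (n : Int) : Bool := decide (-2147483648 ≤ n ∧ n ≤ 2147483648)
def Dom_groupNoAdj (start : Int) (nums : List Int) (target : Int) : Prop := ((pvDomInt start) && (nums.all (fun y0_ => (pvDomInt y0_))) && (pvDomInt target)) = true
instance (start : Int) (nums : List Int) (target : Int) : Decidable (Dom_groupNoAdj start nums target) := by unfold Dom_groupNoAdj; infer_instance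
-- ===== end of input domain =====

-- B replaces A's plain backtracking by the same search memoized on the state
-- (index, remaining target), solving each state at most once (objective: alternative).

-- ===== PORT A =====
-- literal transliteration of A; nums[start] (Python negative-index rule) is
-- PySem.List.pyGet?; its none case (Python IndexError) is excluded by Pre_.
def groupNoAdj (start : Int) (nums : List Int) (target : Int) : Bool :=
  if target = 0 then true
  else if (nums.length : Int) ≤ start then false
  else if groupNoAdj (start + 2) nums (target - (PySem.List.pyGet? nums start).getD 0) then true
  else groupNoAdj (start + 1) nums target
termination_by ((nums.length : Int) - start).toNat
decreasing_by all_goals omega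

-- ===== PORT B =====
-- the inner 'go' of Source B: returns its result together with the updated memo dict
def groupNoAdjGo (nums : List Int) (memo : PySem.Dict (Int × Int) Bool) (i t : Int) :
    Bool × PySem.Dict (Int × Int) Bool :=
  if t = 0 then (true, memo)
  else if (nums.length : Int) ≤ i then (false, memo)
  else
    match memo.get? (i, t) with
    | some b => (b, memo)
    | none =>
      let p1 := groupNoAdjGo nums memo (i + 2) (t - (PySem.List.pyGet? nums i).getD 0)
      if p1.1 then (true, p1.2.insert (i, t) true)
      else
        let p2 := groupNoAdjGo nums p1.2 (i + 1) t
        (p2.1, p2.2.insert (i, t) p2.1)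
termination_by ((nums.length : Int) - i).toNat
decreasing_by all_goals omega

def groupNoAdj_alt (start : Int) (nums : List Int) (target : Int) : Bool :=
  (groupNoAdjGo nums PySem.Dict.empty start target).1

-- ===== PRECONDITION & SPEC =====
-- Pre_ excludes exactly the inputs where Python A raises IndexError:
-- target ≠ 0 and start below -len(nums) (nums[start] out of range).
def Pre_groupNoAdj (start : Int) (nums : List Int) (target : Int) : Prop :=
  target = 0 ∨ -(nums.length : Int) ≤ start
instance (start : Int) (nums : List Int) (target : Int) : Decidable (Pre_groupNoAdj start nums target) := by unfold Pre_groupNoAdj; infer_instance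

def pvWitness_groupNoAdj : Int × List Int × Int := (0, [2, 7, 1, 3], 5)

def Spec_groupNoAdj (start : Int) (nums : List Int) (target : Int) (out : Bool) : Prop := out = groupNoAdj_alt start nums target
instance (start : Int) (nums : List Int) (target : Int) (out : Bool) : Decidable (Spec_groupNoAdj start nums target out) := by unfold Spec_groupNoAdj; infer_instance

-- ===== CLAIM (what is proved, stated in full; the proofs are below) =====
def Claim_equal_groupNoAdj : Prop := ∀ (start : Int) (nums : List Int) (target : Int), Dom_groupNoAdj start nums target → Pre_groupNoAdj start nums target → Spec_groupNoAdj start nums target (groupNoAdj start nums target)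

-- ===== LEMMAS AND PROOFS =====

-- a memo is sound if every stored value is the plain recursion's value for its key
def MemoOK (nums : List Int) (memo : PySem.Dict (Int × Int) Bool) : Prop :=
  ∀ i t b, memo.get? (i, t) = some b → b = groupNoAdj i nums t

theorem goEq (nums : List Int) (memo : PySem.Dict (Int × Int) Bool) (i t : Int)
    (h : MemoOK nums memo) :
    (groupNoAdjGo nums memo i t).1 = groupNoAdj i nums t ∧
      MemoOK nums (groupNoAdjGo nums memo i t).2 := by
  rw [groupNoAdjGo, groupNoAdj]
  split
  · exact ⟨rfl, h⟩
  · split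
    · exact ⟨rfl, h⟩
    · rename_i ht hi
      cases hm : memo.get? (i, t) with
      | some b =>
        dsimp only
        refine ⟨?_, h⟩
        rw [h i t b hm, groupNoAdj]
        simp [ht, hi]
      | none =>
        dsimp only
        have ih1 := goEq nums memo (i + 2) (t - (PySem.List.pyGet? nums i).getD 0) h
        by_cases h1 : (groupNoAdjGo nums memo (i + 2) (t - (PySem.List.pyGet? nums i).getD 0)).1 = true
        · have hA1 : groupNoAdj (i + 2) nums (t - (PySem.List.pyGet? nums i).getD 0) = true :=
            ih1.1.symm.trans h1
          rw [if_pos h1]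
          refine ⟨?_, ?_⟩
          · simp [hA1]
          · intro i' t' b' hb'
            simp only [PySem.Dict.get?_insert] at hb'
            split at hb'
            · rename_i heq
              simp only [Prod.mk.injEq] at heq
              obtain ⟨rfl, rfl⟩ := heq
              cases hb'
              rw [groupNoAdj]; simp [ht, hi, hA1]
            · exact ih1.2 i' t' b' hb'
        · have h1' : (groupNoAdjGo nums memo (i + 2) (t - (PySem.List.pyGet? nums i).getD 0)).1 = false :=
            Bool.eq_false_iff.mpr h1
          have hA1 : groupNoAdj (i + 2) nums (t - (PySem.List.pyGet? nums i).getD 0) = false := by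
            rw [← ih1.1]; exact h1'
          have ih2 := goEq nums (groupNoAdjGo nums memo (i + 2) (t - (PySem.List.pyGet? nums i).getD 0)).2
            (i + 1) t ih1.2
          have hAit : groupNoAdj i nums t = groupNoAdj (i + 1) nums t := by
            conv_lhs => rw [groupNoAdj]
            simp [ht, hi, hA1]
          rw [if_neg h1]
          refine ⟨?_, ?_⟩
          · simp [hA1, ih2.1]
          · intro i' t' b' hb'
            simp only [PySem.Dict.get?_insert] at hb'
            split at hb'
            · rename_i heq
              simp only [Prod.mk.injEq] at heq
              obtain ⟨rfl, rfl⟩ := heq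
              cases hb'
              rw [hAit, ← ih2.1]
            · exact ih2.2 i' t' b' hb'
termination_by ((nums.length : Int) - i).toNat
decreasing_by all_goals omega

-- ===== VERDICT (by name: the statement is the Claim_ definition above) =====
theorem groupNoAdj_spec : Claim_equal_groupNoAdj := by
  intro start nums target _ _
  unfold Spec_groupNoAdj groupNoAdj_alt
  exact (goEq nums PySem.Dict.empty start target
    (fun i t b hb => by simp [PySem.Dict.get?_empty] at hb)).1.symm
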